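-- pv_equiv track=rewrite | github.com/matus-pikuliak/crosslingual-parameter-sharing | preprocessing/ner-cs.py | get_type
-- ===== SOURCE A (Python) =====
-- def get_type(word):
--     tags = {
--         'P': 'PER',
--         'p': 'PER',
--         'g': 'LOC',
--         'i': 'ORG',
--         'ms': 'ORG',
--         'oa': 'MISC',
--         'op': 'MISC',
--     }
--     for tag in tags:
--         if word.startswith(f'<{tag}'):
--             return tags[tag]
--     return 'O'
-- ===== SOURCE B (Python) =====
-- def get_type(word):
--     tags = {
--         'P': 'PER',
--         'p': 'PER',
--         'g': 'LOC',
--         'i': 'ORG',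
--         'ms': 'ORG',
--         'oa': 'MISC',
--         'op': 'MISC',
--     }
--     if not word.startswith('<'):
--         return 'O'
--     return tags.get(word[1:3], tags.get(word[1:2], 'O'))
-- ===== Notes on version B (the rewrite author's own statement) =====
-- stated objective: simpler
-- what changed: Replaced the linear scan of startswith tests over all seven prefixes by a single opening-bracket check followed by direct keyed lookups of the sliced two-character and one-character prefixes in the same dict.
import Mathlib
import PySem

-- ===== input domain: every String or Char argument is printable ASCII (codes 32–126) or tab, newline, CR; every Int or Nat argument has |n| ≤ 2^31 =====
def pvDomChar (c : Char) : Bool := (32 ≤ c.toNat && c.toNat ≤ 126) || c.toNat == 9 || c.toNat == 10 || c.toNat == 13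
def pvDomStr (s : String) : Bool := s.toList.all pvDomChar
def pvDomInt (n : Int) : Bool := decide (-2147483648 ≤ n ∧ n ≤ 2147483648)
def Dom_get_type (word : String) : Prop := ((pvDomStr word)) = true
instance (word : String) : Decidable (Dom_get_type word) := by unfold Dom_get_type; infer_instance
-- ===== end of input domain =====

-- B replaces A's linear scan of startswith tests by one opening-bracket check plus direct
-- dict lookups of the sliced two- and one-character prefixes (objective: simpler).

-- ===== PORT A =====
-- the tags dict (insertion order), shared by both ports as in the Python sources
def pvTags : PySem.Dict String String :=
  PySem.Dict.ofList
    [("P", "PER"), ("p", "PER"), ("g", "LOC"), ("i", "ORG"),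
     ("ms", "ORG"), ("oa", "MISC"), ("op", "MISC")]

-- A's loop: for tag in tags: if word.startswith('<' + tag): return tags[tag]
def pvScan (word : String) : List String → String
  | [] => "O"
  | t :: rest =>
      if PySem.Chars.startswith word.toList ('<' :: t.toList) then pvTags.getD t "O"
      else pvScan word rest

def get_type (word : String) : String := pvScan word pvTags.keys

-- ===== PORT B =====
def get_type_alt (word : String) : String :=
  if !(PySem.Str.startswith word "<") then "O"
  else pvTags.getD (PySem.Str.slice word (some 1) (some 3))
        (pvTags.getD (PySem.Str.slice word (some 1) (some 2)) "O")

-- ===== PRECONDITION & SPEC =====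
def Spec_get_type (word : String) (out : String) : Prop := out = get_type_alt word
instance (word : String) (out : String) : Decidable (Spec_get_type word out) := by unfold Spec_get_type; infer_instance

-- ===== CLAIM (what is proved, stated in full; the proofs are below) =====
def Claim_equal_get_type : Prop := ∀ (word : String), Dom_get_type word → Spec_get_type word (get_type word)

-- ===== LEMMAS AND PROOFS =====

theorem pvTags_mk : pvTags = PySem.Dict.mk
    [("P", "PER"), ("p", "PER"), ("g", "LOC"), ("i", "ORG"),
     ("ms", "ORG"), ("oa", "MISC"), ("op", "MISC")] := by decide

theorem pvTags_keys : pvTags.keys = ["P", "p", "g", "i", "ms", "oa", "op"] := by decide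

theorem pv_get?_nil (k : String) :
    (PySem.Dict.mk ([] : List (String × String))).get? k = none := rfl

-- lookup of a one-character string in the tags dict
theorem pvTags_getD1 (c1 : Char) (d : String) :
    pvTags.getD (String.ofList [c1]) d =
      if 'P' = c1 then "PER" else if 'p' = c1 then "PER"
      else if 'g' = c1 then "LOC" else if 'i' = c1 then "ORG" else d := by
  simp [pvTags_mk, PySem.Dict.getD_eq_get?_getD, PySem.Dict.get?_mk_cons,
        pv_get?_nil, beq_eq_decide, String.ext_iff]
  split_ifs <;> (try subst_vars) <;> first | rfl | simp_all

-- lookup of a two-character string in the tags dict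
theorem pvTags_getD2 (c1 c2 : Char) (d : String) :
    pvTags.getD (String.ofList [c1, c2]) d =
      if 'm' = c1 ∧ 's' = c2 then "ORG" else if 'o' = c1 ∧ 'a' = c2 then "MISC"
      else if 'o' = c1 ∧ 'p' = c2 then "MISC" else d := by
  simp [pvTags_mk, PySem.Dict.getD_eq_get?_getD, PySem.Dict.get?_mk_cons,
        pv_get?_nil, beq_eq_decide, String.ext_iff]
  split_ifs <;> (try subst_vars) <;> first | rfl | simp_all

-- the two ports agree, by cases on (at most) the word's first three characters
theorem pv_eq_of_list (l : List Char) :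
    get_type (String.ofList l) = get_type_alt (String.ofList l) := by
  match l with
  | [] => decide
  | c :: l1 =>
    by_cases hc : c = '<'
    · subst hc
      match l1 with
      | [] => decide
      | c1 :: l2 =>
        match l2 with
        | [] =>
          simp only [get_type, get_type_alt, pvTags_keys]
          simp [pvScan, PySem.Chars.startswith, PySem.Str.startswith, PySem.Str.slice,
                PySem.Chars.slice, PySem.List.slice, List.isPrefixOf,
                pvTags_getD1, pvTags_getD2]
          split_ifs <;> (try subst_vars) <;> first | rfl | simp_all
        | c2 :: l3 =>
          simp only [get_type, get_type_alt, pvTags_keys]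
          simp [pvScan, PySem.Chars.startswith, PySem.Str.startswith, PySem.Str.slice,
                PySem.Chars.slice, PySem.List.slice, List.isPrefixOf,
                pvTags_getD1, pvTags_getD2]
          split_ifs <;> (try subst_vars) <;> first | rfl | simp_all
    · simp only [get_type, get_type_alt, pvTags_keys]
      simp [pvScan, PySem.Chars.startswith, PySem.Str.startswith, List.isPrefixOf,
            Ne.symm hc]

-- ===== VERDICT (by name: the statement is the Claim_ definition above) =====
theorem get_type_spec : Claim_equal_get_type := by
  intro word _
  unfold Spec_get_type
  have h := pv_eq_of_list word.toList
  simpa using h
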